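-- pv_equiv track=rewrite | github.com/thelimonadee/WordleSolverExtension | wordle_solver.py | _get_intersecting_score
-- ===== SOURCE A (Python) =====
-- def _get_intersecting_score(word, info):
--     score = 0
--     letters_matched = list()
--     for letter in word:
--         if letter in info and letter not in letters_matched:
--             letters_matched.append(letter)
--             score += info[letter]
--     return score
-- ===== SOURCE B (Python) =====
-- def _get_intersecting_score(word, info):
--     letters = set(word)
--     return sum(v for k, v in info.items() if k in letters)
-- ===== Notes on version B (the rewrite author's own statement) =====
-- stated objective: alternative
-- what changed: Inverts the traversal: instead of scanning the word while maintaining a growing seen-list and testing each letter against the dict, B iterates once over the dict's items and adds each value whose key is in set(word); the dict's unique keys make any seen-tracking disappear.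
import Mathlib
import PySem

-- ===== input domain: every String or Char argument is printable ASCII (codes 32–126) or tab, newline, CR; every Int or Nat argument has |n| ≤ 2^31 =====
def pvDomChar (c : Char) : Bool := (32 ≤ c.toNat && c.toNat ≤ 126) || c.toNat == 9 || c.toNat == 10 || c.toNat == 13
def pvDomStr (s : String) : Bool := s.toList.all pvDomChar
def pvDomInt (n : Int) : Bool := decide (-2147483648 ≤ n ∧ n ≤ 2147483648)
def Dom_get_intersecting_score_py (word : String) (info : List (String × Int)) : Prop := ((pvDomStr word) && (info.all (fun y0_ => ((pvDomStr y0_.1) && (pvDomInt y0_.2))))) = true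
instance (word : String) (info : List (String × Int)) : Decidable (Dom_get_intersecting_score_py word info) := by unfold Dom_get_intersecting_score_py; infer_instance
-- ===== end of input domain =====

-- B inverts the traversal: instead of scanning the word with a growing seen-list,
-- it makes one pass over the dict's items, adding each value whose key is in set(word); objective: alternative.

-- ===== PORT A =====
def get_intersecting_score_py (word : String) (info : List (String × Int)) : Int :=
  let d := PySem.Dict.ofList info
  (word.toList.foldl
    (fun (st : Int × List Char) letter =>
      if d.contains (String.ofList [letter]) && !st.2.contains letter then
        (st.1 + d.getD (String.ofList [letter]) 0, st.2 ++ [letter])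
      else st)
    (0, [])).1

-- ===== PORT B =====
def get_intersecting_score_py_alt (word : String) (info : List (String × Int)) : Int :=
  let letters : PySem.Set String := PySem.Set.ofList (word.toList.map (fun c => String.ofList [c]))
  ((((PySem.Dict.ofList info).items.filter
      (fun kv => PySem.Set.contains letters kv.1)).map Prod.snd).sum)

-- ===== PRECONDITION & SPEC =====
def Spec_get_intersecting_score_py (word : String) (info : List (String × Int)) (out : Int) : Prop := out = get_intersecting_score_py_alt word info
instance (word : String) (info : List (String × Int)) (out : Int) : Decidable (Spec_get_intersecting_score_py word info out) := by unfold Spec_get_intersecting_score_py; infer_instance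

-- ===== CLAIM (what is proved, stated in full; the proofs are below) =====
def Claim_equal_get_intersecting_score_py : Prop := ∀ (word : String) (info : List (String × Int)), Dom_get_intersecting_score_py word info → Spec_get_intersecting_score_py word info (get_intersecting_score_py word info)

-- ===== LEMMAS AND PROOFS =====

-- Injectivity of the char → single-char-string embedding.
theorem pv_single_inj {c c' : Char} (h : String.ofList [c] = String.ofList [c']) : c = c' := by
  have := congrArg String.toList h
  simpa using this

-- Loop invariant of A's fold: the running score grows by the values of the distinct
-- new letters of l that pass the test and are not yet in the matched list m.
theorem pv_score_foldl (p : Char → Bool) (v : Char → Int) :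
    ∀ (l m : List Char) (s : Int),
      (l.foldl
        (fun (st : Int × List Char) c =>
          if p c && !st.2.contains c then (st.1 + v c, st.2 ++ [c]) else st)
        (s, m)).1
      = s + (((PySem.Set.ofList l).filter (fun c => p c && !m.contains c)).map v).sum := by
  intro l
  induction l with
  | nil => intro m s; simp [PySem.Set.ofList]
  | cons c l ih =>
    intro m s
    rw [List.foldl_cons, PySem.Set.ofList_cons]
    by_cases h : (p c && !m.contains c) = true
    · rw [if_pos h, ih]
      have hfil : ((PySem.Set.ofList l).filter (fun x => p x && !(m ++ [c]).contains x))
          = ((PySem.Set.discard (PySem.Set.ofList l) c).filter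
            (fun x => p x && !m.contains x)) := by
        show _ = (((PySem.Set.ofList l).filter (fun y => !(y == c))).filter
            (fun x => p x && !m.contains x))
        rw [List.filter_filter]
        apply List.filter_congr
        intro x _
        by_cases hx : x = c
        · subst hx; simp
        · simp [hx]
      rw [hfil, List.filter_cons, if_pos h]
      simp
      ring
    · have hc : (p c && !m.contains c) = false := by
        revert h; cases (p c && !m.contains c) <;> simp
      rw [if_neg h, ih, List.filter_cons, hc]
      have hfil : ((PySem.Set.discard (PySem.Set.ofList l) c).filter
            (fun x => p x && !m.contains x))
          = ((PySem.Set.ofList l).filter (fun x => p x && !m.contains x)) := by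
        show (((PySem.Set.ofList l).filter (fun y => !(y == c))).filter
            (fun x => p x && !m.contains x)) = _
        rw [List.filter_filter]
        apply List.filter_congr
        intro x _
        by_cases hx : x = c
        · subst hx
          simp
          intro hp
          rw [hp] at hc
          simpa using hc
        · simp [hx]
      rw [hfil]
      simp

-- Splitting a filtered sum over a disjunction of mutually exclusive predicates.
theorem pv_sum_filter_or (p q : (String × Int) → Bool) :
    ∀ (l : List (String × Int)), (∀ x ∈ l, ¬(p x = true ∧ q x = true)) →
      ((l.filter (fun x => p x || q x)).map Prod.snd).sum
        = ((l.filter p).map Prod.snd).sum + ((l.filter q).map Prod.snd).sum := by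
  intro l
  induction l with
  | nil => intro _; simp
  | cons a l ih =>
    intro hx
    have hl : ∀ x ∈ l, ¬(p x = true ∧ q x = true) := fun x hm => hx x (List.mem_cons_of_mem _ hm)
    by_cases hp : p a = true
    · have hq : q a = false := by
        have := hx a (List.mem_cons_self)
        revert this; cases hqa : q a <;> simp [hp]
      simp [hp, hq, ih hl]
      ring
    · have hp' : p a = false := by revert hp; cases p a <;> simp
      by_cases hq : q a = true
      · simp [hp', hq, ih hl]
        ring
      · have hq' : q a = false := by revert hq; cases q a <;> simp
        simp [hp', hq', ih hl]

-- In a list of pairs with distinct keys, the filter on one key is the singleton holding it.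
theorem pv_filter_key_singleton (k : String) (v : Int) :
    ∀ (l : List (String × Int)), (l.map Prod.fst).Nodup → (k, v) ∈ l →
      l.filter (fun kv => kv.1 == k) = [(k, v)] := by
  intro l
  induction l with
  | nil => intro _ hm; cases hm
  | cons a l ih =>
    intro hn hm
    simp only [List.map_cons, List.nodup_cons] at hn
    have hn' : (l.map Prod.fst).Nodup := hn.2
    have hna : a.1 ∉ l.map Prod.fst := hn.1
    rcases List.mem_cons.mp hm with h | h
    · subst h
      rw [List.filter_cons, if_pos (by simp)]
      have : l.filter (fun kv => kv.1 == k) = [] := by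
        apply List.filter_eq_nil_iff.mpr
        intro kv hkv
        simp only [beq_iff_eq]
        intro hk
        exact hna (by simpa [← hk] using List.mem_map_of_mem (f := Prod.fst) hkv)
      simp [this]
    · have hne : (a.1 == k) = false := by
        simp only [beq_eq_false_iff_ne, ne_eq]
        intro hk
        exact hna (by simpa [hk] using List.mem_map_of_mem (f := Prod.fst) h)
      rw [List.filter_cons, if_neg (by simp [hne]), ih hn' h]

-- The filtered-items sum at a single key is getD-if-contains.
theorem pv_sum_filter_eq_key (d : PySem.Dict String Int) (hn : d.keys.Nodup) (k : String) :
    ((d.items.filter (fun kv => kv.1 == k)).map Prod.snd).sum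
      = (if d.contains k then d.getD k 0 else 0) := by
  have hn' : (d.items.map Prod.fst).Nodup := hn
  by_cases hc : d.contains k = true
  · have hk : k ∈ d.items.map Prod.fst := (PySem.Dict.contains_iff_mem_keys _ _).mp hc
    obtain ⟨⟨k', v⟩, hkv, hfst⟩ := List.mem_map.mp hk
    simp only at hfst
    subst hfst
    rw [pv_filter_key_singleton k' v d.items hn' hkv,
      PySem.Dict.getD_of_mem_items d hkv hn, if_pos hc]
    simp
  · have hc' : d.contains k = false := by revert hc; cases d.contains k <;> simp
    have : d.items.filter (fun kv => kv.1 == k) = [] := by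
      apply List.filter_eq_nil_iff.mpr
      intro kv hkv
      simp only [beq_iff_eq]
      intro hk
      have hmem : k ∈ d.keys := by
        show k ∈ d.items.map Prod.fst
        exact hk ▸ List.mem_map_of_mem (f := Prod.fst) hkv
      rw [(PySem.Dict.contains_iff_mem_keys _ _).mpr hmem] at hc'
      cases hc'
    simp [this, hc']

-- Main bridge: summing getD over the distinct matched letters equals summing the
-- values of dict items whose key is one of those letters.
theorem pv_main (d : PySem.Dict String Int) (hn : d.keys.Nodup) :
    ∀ (W : List Char), W.Nodup →
      ((W.filter (fun c => d.contains (String.ofList [c]))).map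
          (fun c => d.getD (String.ofList [c]) 0)).sum
        = ((d.items.filter
            (fun kv => (W.map (fun c => String.ofList [c])).contains kv.1)).map Prod.snd).sum := by
  intro W
  induction W with
  | nil => intro _; simp
  | cons c W ih =>
    intro hW
    have hcW : c ∉ W := (List.nodup_cons.mp hW).1
    have hW' : W.Nodup := (List.nodup_cons.mp hW).2
    have hsplit := pv_sum_filter_or (fun kv => kv.1 == String.ofList [c])
        (fun kv => (W.map (fun x => String.ofList [x])).contains kv.1) d.items
        (by
          intro kv _
          rintro ⟨h1, h2⟩
          have hk : kv.1 = String.ofList [c] := by simpa using h1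
          have : String.ofList [c] ∈ W.map (fun x => String.ofList [x]) := by
            have := List.elem_iff.mp h2
            rwa [hk] at this
          obtain ⟨c', hc', he⟩ := List.mem_map.mp this
          exact hcW ((pv_single_inj he.symm) ▸ hc'))
    have hpred : (fun kv : String × Int =>
          ((c :: W).map (fun x => String.ofList [x])).contains kv.1)
        = (fun kv => (kv.1 == String.ofList [c])
            || (W.map (fun x => String.ofList [x])).contains kv.1) := by
      funext kv
      rw [Bool.eq_iff_iff]
      simp
    rw [List.filter_cons]
    by_cases hc : d.contains (String.ofList [c]) = true
    · rw [if_pos hc, List.map_cons, List.sum_cons, ih hW', hpred, hsplit,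
        pv_sum_filter_eq_key d hn, if_pos hc]
    · have hc' : d.contains (String.ofList [c]) = false := by
        revert hc; cases d.contains (String.ofList [c]) <;> simp
      rw [if_neg (by simp [hc']), ih hW', hpred, hsplit, pv_sum_filter_eq_key d hn, hc']
      simp

-- Set membership tests reduce to raw-list membership tests.
theorem pv_contains_ofList (L : List String) (x : String) :
    PySem.Set.contains (PySem.Set.ofList L) x = L.contains x := by
  simp [PySem.Set.contains, PySem.Set.mem_ofList]

theorem pv_contains_map_ofList (xs : List Char) (f : Char → String) (x : String) :
    ((PySem.Set.ofList xs).map f).contains x = (xs.map f).contains x := by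
  rw [Bool.eq_iff_iff]
  simp only [List.elem_iff, List.mem_map, PySem.Set.mem_ofList]

-- ===== VERDICT (by name: the statement is the Claim_ definition above) =====
theorem get_intersecting_score_py_spec : Claim_equal_get_intersecting_score_py := by
  intro word info _
  show get_intersecting_score_py word info = get_intersecting_score_py_alt word info
  unfold get_intersecting_score_py get_intersecting_score_py_alt
  rw [pv_score_foldl (fun c => (PySem.Dict.ofList info).contains (String.ofList [c]))
        (fun c => (PySem.Dict.ofList info).getD (String.ofList [c]) 0) word.toList [] 0]
  simp only [List.contains_nil, Bool.not_false, Bool.and_true, zero_add]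
  rw [pv_main (PySem.Dict.ofList info) (PySem.Dict.nodup_keys_ofList info)
        (PySem.Set.ofList word.toList) (PySem.Set.nodup_ofList word.toList)]
  apply congrArg
  apply congrArg
  apply List.filter_congr
  intro kv _
  rw [pv_contains_ofList, pv_contains_map_ofList]
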